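-- pv_equiv track=rewrite | github.com/aramadan0096/spreadsheet_viewer | spreadsheet_widget.py | extract_styling_data
-- ===== SOURCE A (Python) =====
-- def extract_styling_data(header_row):
--     """Extract styling data from the header row."""
--     styling_data = {
--         "content_styles": [],
--         "page_styles": [],
--         "letter_styles": []
--     }
--
--     for item in header_row:
--         if item.startswith('@'):
--             style_type, _, style_name = item.partition(' ')
--             if style_type == '@Content':
--                 styling_data["content_styles"].append(style_name)
--             elif style_type == '@Page':
--                 styling_data["page_styles"].append(style_name)
--             elif style_type == '@Letter':
--                 styling_data["letter_styles"].append(style_name)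
--
--     return styling_data
-- ===== SOURCE B (Python) =====
-- def extract_styling_data(header_row):
--     """Extract styling data from the header row (three filtering passes, one per category)."""
--     def styles_for(tag):
--         return [item.partition(' ')[2] for item in header_row
--                 if item.partition(' ')[0] == tag]
--
--     return {
--         "content_styles": styles_for('@Content'),
--         "page_styles": styles_for('@Page'),
--         "letter_styles": styles_for('@Letter'),
--     }
-- ===== Notes on version B (the rewrite author's own statement) =====
-- stated objective: alternative
-- what changed: A's single pass dispatching each item into a mutable dict via startswith('@') plus an if/elif chain is replaced by three independent filtering passes over header_row, one comprehension per output key, keyed directly on partition(' ')[0] (the redundant startswith check disappears); the dict is assembled once at the end.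
import Mathlib
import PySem

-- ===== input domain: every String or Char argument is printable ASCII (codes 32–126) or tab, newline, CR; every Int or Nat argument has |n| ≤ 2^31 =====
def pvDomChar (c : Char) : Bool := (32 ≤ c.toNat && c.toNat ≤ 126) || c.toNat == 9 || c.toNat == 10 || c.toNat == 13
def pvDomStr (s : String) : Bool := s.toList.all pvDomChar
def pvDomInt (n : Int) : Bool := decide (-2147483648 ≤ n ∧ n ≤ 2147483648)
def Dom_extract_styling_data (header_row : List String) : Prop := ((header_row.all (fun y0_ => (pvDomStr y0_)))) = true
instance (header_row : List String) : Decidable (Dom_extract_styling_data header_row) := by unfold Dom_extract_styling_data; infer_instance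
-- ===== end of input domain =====

-- B replaces A's one-pass if/elif dispatch into a mutable dict by three independent
-- filtering passes over header_row, one per output key (objective: alternative).

-- s.partition(' ') restricted to the two components both Pythons use: (before, after).
-- Exact for str.partition(' '): split at the FIRST space; if no space, (s, "", "").
def pyPartitionSpace (s : String) : String × String :=
  match s.toList.findIdx? (· == ' ') with
  | none => (s, "")
  | some i => (String.ofList (s.toList.take i), String.ofList (s.toList.drop (i + 1)))

-- ===== PORT A =====
-- the loop body of A (one iteration of 'for item in header_row')
def styleStep (d : PySem.Dict String (List String)) (item : String) : PySem.Dict String (List String) :=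
  if PySem.Str.startswith item "@" then
    let (style_type, style_name) := pyPartitionSpace item
    if style_type == "@Content" then
      d.modify "content_styles" [] (fun xs => xs ++ [style_name])
    else if style_type == "@Page" then
      d.modify "page_styles" [] (fun xs => xs ++ [style_name])
    else if style_type == "@Letter" then
      d.modify "letter_styles" [] (fun xs => xs ++ [style_name])
    else d
  else d

def extract_styling_data (header_row : List String) : List (String × List String) :=
  let styling_data : PySem.Dict String (List String) :=
    PySem.Dict.ofList [("content_styles", []), ("page_styles", []), ("letter_styles", [])]
  (header_row.foldl styleStep styling_data).items

-- ===== PORT B =====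
-- one comprehension per category: keep item.partition(' ')[2] when partition(' ')[0] matches
def stylesFor (tag : String) (header_row : List String) : List String :=
  header_row.filterMap (fun item =>
    if (pyPartitionSpace item).1 == tag then some (pyPartitionSpace item).2 else none)

def extract_styling_data_alt (header_row : List String) : List (String × List String) :=
  [("content_styles", stylesFor "@Content" header_row),
   ("page_styles", stylesFor "@Page" header_row),
   ("letter_styles", stylesFor "@Letter" header_row)]

-- ===== PRECONDITION & SPEC =====
def Spec_extract_styling_data (header_row : List String) (out : List (String × List String)) : Prop := out = extract_styling_data_alt header_row
instance (header_row : List String) (out : List (String × List String)) : Decidable (Spec_extract_styling_data header_row out) := by unfold Spec_extract_styling_data; infer_instance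

-- ===== CLAIM (what is proved, stated in full; the proofs are below) =====
def Claim_equal_extract_styling_data : Prop := ∀ (header_row : List String), Dom_extract_styling_data header_row → Spec_extract_styling_data header_row (extract_styling_data header_row)

-- ===== LEMMAS AND PROOFS =====

-- the first partition component inherits the item's first character
lemma startswith_of_partition_head (s : String) (c : Char)
    (h : (pyPartitionSpace s).1.toList.head? = some c) :
    PySem.Str.startswith s (String.ofList [c]) = true := by
  unfold pyPartitionSpace at h
  rcases hf : s.toList.findIdx? (· == ' ') with _ | i <;> rw [hf] at h <;>
    simp only [String.toList_ofList] at h <;>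
    simp only [PySem.Str.startswith, PySem.Chars.startswith, List.isPrefixOf_iff_prefix,
      String.toList_ofList]
  · rcases hl : s.toList with _ | ⟨a, l⟩ <;> rw [hl] at h <;> simp at h
    simp [h]
  · rcases hl : s.toList with _ | ⟨a, l⟩ <;> rw [hl] at h
    · simp at h
    · rcases i with _ | i <;> simp at h
      simp [h]

lemma step_content (item : String) (c p l : List String)
    (h1 : (pyPartitionSpace item).1 = "@Content") :
    styleStep (PySem.Dict.mk [("content_styles", c), ("page_styles", p), ("letter_styles", l)]) item
    = PySem.Dict.mk [("content_styles", c ++ [(pyPartitionSpace item).2]), ("page_styles", p), ("letter_styles", l)] := by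
  have hsw := startswith_of_partition_head item '@' (by rw [h1]; decide)
  have hb : PySem.Chars.startswith item.toList ['@'] = true := by
    simpa [PySem.Str.startswith] using hsw
  unfold styleStep
  simp [hb, h1, PySem.Dict.modify, PySem.Dict.insert, PySem.Dict.getD, PySem.Dict.get?,
    PySem.Dict.contains]

lemma step_page (item : String) (c p l : List String)
    (h1 : (pyPartitionSpace item).1 = "@Page") :
    styleStep (PySem.Dict.mk [("content_styles", c), ("page_styles", p), ("letter_styles", l)]) item
    = PySem.Dict.mk [("content_styles", c), ("page_styles", p ++ [(pyPartitionSpace item).2]), ("letter_styles", l)] := by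
  have hsw := startswith_of_partition_head item '@' (by rw [h1]; decide)
  have hb : PySem.Chars.startswith item.toList ['@'] = true := by
    simpa [PySem.Str.startswith] using hsw
  unfold styleStep
  simp [hb, h1, PySem.Dict.modify, PySem.Dict.insert, PySem.Dict.getD, PySem.Dict.get?,
    PySem.Dict.contains]

lemma step_letter (item : String) (c p l : List String)
    (h1 : (pyPartitionSpace item).1 = "@Letter") :
    styleStep (PySem.Dict.mk [("content_styles", c), ("page_styles", p), ("letter_styles", l)]) item
    = PySem.Dict.mk [("content_styles", c), ("page_styles", p), ("letter_styles", l ++ [(pyPartitionSpace item).2])] := by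
  have hsw := startswith_of_partition_head item '@' (by rw [h1]; decide)
  have hb : PySem.Chars.startswith item.toList ['@'] = true := by
    simpa [PySem.Str.startswith] using hsw
  unfold styleStep
  simp [hb, h1, PySem.Dict.modify, PySem.Dict.insert, PySem.Dict.getD, PySem.Dict.get?,
    PySem.Dict.contains]

lemma step_skip (item : String) (d : PySem.Dict String (List String))
    (h1 : (pyPartitionSpace item).1 ≠ "@Content")
    (h2 : (pyPartitionSpace item).1 ≠ "@Page")
    (h3 : (pyPartitionSpace item).1 ≠ "@Letter") :
    styleStep d item = d := by
  unfold styleStep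
  by_cases h0 : PySem.Str.startswith item "@" = true <;> simp [h0, h1, h2, h3]

lemma loop_invariant (hs : List String) (c p l : List String) :
    (hs.foldl styleStep
      (PySem.Dict.mk [("content_styles", c), ("page_styles", p), ("letter_styles", l)])).items
    = [("content_styles", c ++ stylesFor "@Content" hs),
       ("page_styles", p ++ stylesFor "@Page" hs),
       ("letter_styles", l ++ stylesFor "@Letter" hs)] := by
  induction hs generalizing c p l with
  | nil => simp [stylesFor]
  | cons item hs ih =>
    rw [List.foldl_cons]
    by_cases h1 : (pyPartitionSpace item).1 = "@Content"
    · have hne2 : (pyPartitionSpace item).1 ≠ "@Page" := by simp [h1]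
      have hne3 : (pyPartitionSpace item).1 ≠ "@Letter" := by simp [h1]
      rw [step_content item c p l h1, ih]
      simp [stylesFor, h1, hne2, hne3]
    · by_cases h2 : (pyPartitionSpace item).1 = "@Page"
      · have hne3 : (pyPartitionSpace item).1 ≠ "@Letter" := by simp [h2]
        rw [step_page item c p l h2, ih]
        simp [stylesFor, h1, h2, hne3]
      · by_cases h3 : (pyPartitionSpace item).1 = "@Letter"
        · rw [step_letter item c p l h3, ih]
          simp [stylesFor, h1, h2, h3]
        · rw [step_skip item _ h1 h2 h3, ih]
          simp [stylesFor, h1, h2, h3]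

-- ===== VERDICT (by name: the statement is the Claim_ definition above) =====
theorem extract_styling_data_spec : Claim_equal_extract_styling_data := by
  intro header_row _
  show extract_styling_data header_row = extract_styling_data_alt header_row
  unfold extract_styling_data extract_styling_data_alt
  simpa [PySem.Dict.ofList] using loop_invariant header_row [] [] []
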